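-- pv_equiv track=rewrite | github.com/yunjaeekim/Baekjoon | 260416/최고의 13위치 2/best-place-of-13-2.py | cnt_pos
-- ===== SOURCE A (Python) =====
-- def cnt_pos(lst,upper_lst):
--     if len(lst) == 0:
--         return 0
--
--     flag = len(upper_lst) == 0
--
--     if len(lst) == 1:
--         if flag:
--             return 1
--
--         pos = lst[0]
--         for upp in upper_lst:
--             if abs(pos-upp) >2:
--                 return 1
--         return 0
--
--     past = lst[0]
--     for pos in lst:
--         if pos-past >2:
--             for upp in upper_lst:
--                 if abs(pos-upp) >2:
--                     return 2
--             past = pos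
--         past = pos
--     return 1
-- ===== SOURCE B (Python) =====
-- def cnt_pos(lst, upper_lst):
--     # Replace the inner per-position scan by a min/max range test computed once:
--     # some upper is farther than 2 from pos  iff  min(upper_lst) < pos-2 or max(upper_lst) > pos+2.
--     if not lst:
--         return 0
--     if upper_lst:
--         lo, hi = min(upper_lst), max(upper_lst)
--         def far(pos):
--             return lo < pos - 2 or hi > pos + 2
--     else:
--         def far(pos):
--             return False
--     if len(lst) == 1:
--         return 1 if not upper_lst or far(lst[0]) else 0
--     return 2 if any(b - a > 2 and far(b) for a, b in zip(lst, lst[1:])) else 1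
-- ===== Notes on version B (the rewrite author's own statement) =====
-- stated objective: alternative
-- what changed: The per-position inner scan of upper_lst is replaced by a once-computed min/max of upper_lst plus a range test (a far upper exists iff min < pos-2 or max > pos+2), and the main loop becomes a single any() over consecutive pairs.
import Mathlib
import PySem

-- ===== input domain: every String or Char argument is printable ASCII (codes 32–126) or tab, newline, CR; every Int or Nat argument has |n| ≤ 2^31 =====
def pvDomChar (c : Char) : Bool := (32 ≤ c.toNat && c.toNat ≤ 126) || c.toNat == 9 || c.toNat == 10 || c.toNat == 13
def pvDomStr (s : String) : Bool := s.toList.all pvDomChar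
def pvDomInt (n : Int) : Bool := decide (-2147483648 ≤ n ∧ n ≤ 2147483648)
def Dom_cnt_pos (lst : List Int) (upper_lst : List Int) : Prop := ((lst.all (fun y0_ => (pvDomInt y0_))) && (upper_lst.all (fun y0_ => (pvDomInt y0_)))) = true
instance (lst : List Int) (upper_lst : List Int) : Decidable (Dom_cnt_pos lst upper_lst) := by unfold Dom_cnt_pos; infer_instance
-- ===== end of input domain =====

-- B replaces A's per-position inner scan of upper_lst by a once-computed min/max range test over consecutive pairs (alternative algorithm, same return value).

-- ===== PORT A =====
-- the inner 'for upp in upper_lst: if abs(pos-upp) > 2: return …' scan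
def hasFarA (pos : Int) : List Int → Bool
  | [] => false
  | u :: rest => if 2 < |pos - u| then true else hasFarA pos rest

-- the 'past = lst[0]; for pos in lst: …' loop (the two 'past = pos' collapse to one state update)
def cntLoopA (upper_lst : List Int) : Int → List Int → Int
  | _, [] => 1
  | past, pos :: rest =>
      if 2 < pos - past then
        if hasFarA pos upper_lst then 2 else cntLoopA upper_lst pos rest
      else cntLoopA upper_lst pos rest

def cnt_pos (lst : List Int) (upper_lst : List Int) : Int :=
  match lst with
  | [] => 0
  | [p] =>
      if upper_lst.isEmpty then 1
      else if hasFarA p upper_lst then 1 else 0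
  | p :: q :: rest => cntLoopA upper_lst p (p :: q :: rest)

-- ===== PORT B =====
-- the 'far' closure of Source B: lo, hi = min(upper_lst), max(upper_lst); far(pos) = lo < pos-2 or hi > pos+2
def farB (upper_lst : List Int) : Int → Bool :=
  match PySem.List.min? upper_lst (fun x => x), PySem.List.max? upper_lst (fun x => x) with
  | some lo, some hi => fun pos => decide (lo < pos - 2) || decide (pos + 2 < hi)
  | _, _ => fun _ => false

def cnt_pos_alt (lst : List Int) (upper_lst : List Int) : Int :=
  match lst with
  | [] => 0
  | p :: rest =>
    let far := farB upper_lst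
    match rest with
    | [] => if upper_lst.isEmpty || far p then 1 else 0
    | _ :: _ =>
        if ((p :: rest).zip rest).any (fun ab => decide (2 < ab.2 - ab.1) && far ab.2) then 2 else 1

-- ===== PRECONDITION & SPEC =====
def Spec_cnt_pos (lst : List Int) (upper_lst : List Int) (out : Int) : Prop := out = cnt_pos_alt lst upper_lst
instance (lst : List Int) (upper_lst : List Int) (out : Int) : Decidable (Spec_cnt_pos lst upper_lst out) := by unfold Spec_cnt_pos; infer_instance

-- ===== CLAIM (what is proved, stated in full; the proofs are below) =====
def Claim_equal_cnt_pos : Prop := ∀ (lst : List Int) (upper_lst : List Int), Dom_cnt_pos lst upper_lst → Spec_cnt_pos lst upper_lst (cnt_pos lst upper_lst)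

-- ===== LEMMAS AND PROOFS =====

theorem hasFarA_eq_true_iff (pos : Int) (ul : List Int) :
    hasFarA pos ul = true ↔ ∃ u ∈ ul, 2 < |pos - u| := by
  induction ul with
  | nil => simp [hasFarA]
  | cons u rest ih =>
      simp only [hasFarA, List.mem_cons]
      by_cases h : 2 < |pos - u|
      · simp only [h, if_true, true_iff]
        exact ⟨u, Or.inl rfl, h⟩
      · simp only [h, if_false, ih]
        constructor
        · rintro ⟨x, hx, hfx⟩; exact ⟨x, Or.inr hx, hfx⟩
        · rintro ⟨x, (rfl | hx), hfx⟩
          · exact absurd hfx h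
          · exact ⟨x, hx, hfx⟩

theorem farB_eq (ul : List Int) (pos : Int) : farB ul pos = hasFarA pos ul := by
  unfold farB
  cases hmin : PySem.List.min? ul (fun x => x) with
  | none =>
      have h0 : ul = [] := (PySem.List.min?_eq_none_iff _ _).mp hmin
      subst h0; simp [hasFarA]
  | some lo =>
      cases hmax : PySem.List.max? ul (fun x => x) with
      | none =>
          have h0 : ul = [] := (PySem.List.max?_eq_none_iff _ _).mp hmax
          subst h0; simp [PySem.List.min?] at hmin
      | some hi =>
          have hloMem : lo ∈ ul := PySem.List.min?_mem hmin
          have hhiMem : hi ∈ ul := PySem.List.max?_mem hmax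
          have hloMin := PySem.List.min?_isMin hmin
          have hhiMax := PySem.List.max?_isMax hmax
          have key : hasFarA pos ul = (decide (lo < pos - 2) || decide (pos + 2 < hi)) := by
            rw [Bool.eq_iff_iff]
            simp only [Bool.or_eq_true, decide_eq_true_eq, hasFarA_eq_true_iff]
            constructor
            · rintro ⟨u, hu, hfar⟩
              have hlo := hloMin u hu
              have hhi := hhiMax u hu
              rcases abs_cases (pos - u) with ⟨h1, _⟩ | ⟨h1, _⟩ <;> rw [h1] at hfar
              · left; omega
              · right; omega
            · rintro (h | h)
              · exact ⟨lo, hloMem, by rw [abs_of_pos (by omega : (0:Int) < pos - lo)]; omega⟩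
              · exact ⟨hi, hhiMem, by rw [abs_of_neg (by omega : pos - hi < (0:Int))]; omega⟩
          simpa using key.symm

theorem cntLoopA_eq (ul : List Int) (l : List Int) : ∀ past,
    cntLoopA ul past l =
      if ((past :: l).zip l).any (fun ab => decide (2 < ab.2 - ab.1) && farB ul ab.2) then 2 else 1 := by
  induction l with
  | nil => intro past; simp [cntLoopA]
  | cons pos rest ih =>
      intro past
      rw [List.zip_cons_cons, List.any_cons]
      simp only [cntLoopA]
      by_cases hg : 2 < pos - past
      · by_cases hf : hasFarA pos ul = true
        · simp [hg, farB_eq, hf]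
        · rw [if_pos hg, if_neg hf, ih pos]
          simp only [farB_eq, hf, hg, decide_true, Bool.and_false, Bool.false_or]
      · rw [if_neg hg, ih pos]
        simp only [farB_eq, hg, decide_false, Bool.false_and, Bool.false_or]

-- ===== VERDICT (by name: the statement is the Claim_ definition above) =====
theorem cnt_pos_spec : Claim_equal_cnt_pos := by
  intro lst ul _
  unfold Spec_cnt_pos
  match lst with
  | [] => rfl
  | [p] =>
      simp only [cnt_pos, cnt_pos_alt, farB_eq]
      by_cases he : ul.isEmpty
      · simp [he]
      · simp only [he, Bool.false_or]
        by_cases hf : hasFarA p ul = true <;> simp [hf]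
  | p :: q :: rest =>
      simp only [cnt_pos, cnt_pos_alt]
      rw [cntLoopA_eq ul (p :: q :: rest) p]
      simp only [List.zip_cons_cons, List.any_cons, sub_self,
        show (decide ((2:Int) < 0)) = false from rfl, Bool.false_and, Bool.false_or]
      rfl
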